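-- pv_equiv track=rewrite | github.com/notruilin/COMP90042_2019_SM1-Web-Search-and-Text-Analysis | Project_final/Other Versions/Doc Indexer/QueryWikis.py | extract_last_NN
-- ===== SOURCE A (Python) =====
-- def extract_last_NN(tokens_tags):
--     NNs = []
--     for i in range(len(tokens_tags) - 1, -1, -1):
--         if tokens_tags[i][1].startswith("VB"):   break
--         if tokens_tags[i][0].isalnum() and tokens_tags[i][1].startswith("NN"):
--             NNs.insert(0, tokens_tags[i][0])
--     query = " ".join(NNs)
--     return query
-- ===== SOURCE B (Python) =====
-- def extract_last_NN(tokens_tags):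
--     NNs = []
--     for token, tag in tokens_tags:
--         if tag.startswith("VB"):
--             NNs = []
--         elif token.isalnum() and tag.startswith("NN"):
--             NNs.append(token)
--     return " ".join(NNs)
-- ===== Notes on version B (the rewrite author's own statement) =====
-- stated objective: simpler
-- what changed: Single forward pass that resets the noun accumulator at every verb and appends matching nouns, instead of a backward index scan with break and insert(0).
import Mathlib
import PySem

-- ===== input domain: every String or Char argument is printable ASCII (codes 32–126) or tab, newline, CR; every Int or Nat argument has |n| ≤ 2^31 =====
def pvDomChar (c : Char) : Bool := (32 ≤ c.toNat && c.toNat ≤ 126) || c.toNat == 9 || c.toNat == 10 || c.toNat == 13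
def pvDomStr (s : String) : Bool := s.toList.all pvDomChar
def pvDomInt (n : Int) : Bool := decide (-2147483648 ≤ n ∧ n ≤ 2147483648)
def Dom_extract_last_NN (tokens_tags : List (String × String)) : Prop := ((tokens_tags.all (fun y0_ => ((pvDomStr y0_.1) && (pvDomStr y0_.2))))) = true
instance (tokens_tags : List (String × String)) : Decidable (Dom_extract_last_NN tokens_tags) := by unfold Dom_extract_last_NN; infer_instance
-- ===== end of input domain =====

-- B replaces A's backward index scan (break at the first verb, insert(0)) by one forward
-- pass that resets the accumulator at every verb and appends matching nouns (objective: simpler).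

-- ===== PORT A =====
-- A iterates i = len-1 … 0 with a break and NNs.insert(0, token): ported as recursion over
-- the reversed list, stopping at the first "VB" tag and prepending kept tokens.
def pvALoop : List (String × String) → List String → List String
  | [], acc => acc
  | p :: rest, acc =>
    if PySem.Str.startswith p.2 "VB" then acc
    else pvALoop rest
      (if PySem.Str.strIsalnum p.1 && PySem.Str.startswith p.2 "NN" then p.1 :: acc else acc)

def extract_last_NN (tokens_tags : List (String × String)) : String :=
  PySem.Str.join " " (pvALoop tokens_tags.reverse [])

-- ===== PORT B =====
def pvBStep (NNs : List String) (p : String × String) : List String :=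
  if PySem.Str.startswith p.2 "VB" then []
  else if PySem.Str.strIsalnum p.1 && PySem.Str.startswith p.2 "NN" then NNs ++ [p.1]
  else NNs

def extract_last_NN_alt (tokens_tags : List (String × String)) : String :=
  PySem.Str.join " " (tokens_tags.foldl pvBStep [])

-- ===== PRECONDITION & SPEC =====
def Spec_extract_last_NN (tokens_tags : List (String × String)) (out : String) : Prop := out = extract_last_NN_alt tokens_tags
instance (tokens_tags : List (String × String)) (out : String) : Decidable (Spec_extract_last_NN tokens_tags out) := by unfold Spec_extract_last_NN; infer_instance

-- ===== CLAIM (what is proved, stated in full; the proofs are below) =====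
def Claim_equal_extract_last_NN : Prop := ∀ (tokens_tags : List (String × String)), Dom_extract_last_NN tokens_tags → Spec_extract_last_NN tokens_tags (extract_last_NN tokens_tags)

-- ===== LEMMAS AND PROOFS =====
def pvNotVB (p : String × String) : Bool := !(PySem.Str.startswith p.2 "VB")
def pvKeep (p : String × String) : Bool :=
  PySem.Str.strIsalnum p.1 && PySem.Str.startswith p.2 "NN"

-- normal form of A's loop: kept tokens of the verb-free prefix of the reversed list, re-reversed
theorem pvALoop_eq : ∀ (rl : List (String × String)) (acc : List String),
    pvALoop rl acc = (((rl.takeWhile pvNotVB).filter pvKeep).map (·.1)).reverse ++ acc := by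
  intro rl
  induction rl with
  | nil => intro acc; simp [pvALoop]
  | cons p rest ih =>
    intro acc
    by_cases h : PySem.Chars.startswith p.2.toList ['V', 'B'] = true <;>
    by_cases ha : PySem.Chars.strIsalnum p.1.toList = true <;>
    by_cases hn : PySem.Chars.startswith p.2.toList ['N', 'N'] = true <;>
    simp [pvALoop, pvNotVB, pvKeep, List.takeWhile, h, ha, hn, ih]

-- normal form of B's fold
theorem pvBFold_eq : ∀ (l : List (String × String)) (acc : List String),
    l.foldl pvBStep acc =
      (if l.any (fun p => PySem.Str.startswith p.2 "VB") then [] else acc) ++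
        (((l.reverse.takeWhile pvNotVB).filter pvKeep).map (·.1)).reverse := by
  intro l
  induction l using List.reverseRecOn with
  | nil => intro acc; simp
  | append_singleton ys x ih =>
    intro acc
    rw [List.foldl_append]
    by_cases h : PySem.Chars.startswith x.2.toList ['V', 'B'] = true <;>
    by_cases ha : PySem.Chars.strIsalnum x.1.toList = true <;>
    by_cases hn : PySem.Chars.startswith x.2.toList ['N', 'N'] = true <;>
    by_cases hy : (ys.any fun p => PySem.Chars.startswith p.2.toList ['V', 'B']) = true <;>
    simp [List.foldl, pvBStep, pvNotVB, pvKeep, h, ha, hn, hy, ih]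

-- ===== VERDICT (by name: the statement is the Claim_ definition above) =====
theorem extract_last_NN_spec : Claim_equal_extract_last_NN := by
  intro tt _
  unfold Spec_extract_last_NN extract_last_NN extract_last_NN_alt
  rw [pvALoop_eq, pvBFold_eq]
  simp
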